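-- pv_equiv track=rewrite | github.com/croningp/oligoss | polymersoup/insilico/helpers/helpers.py | generate_all_sequences
-- ===== SOURCE A (Python) =====
-- import copy
--
-- def generate_all_sequences(
--     monomers,
--     max_length,
--     min_length=1,
--     sequencing=True,
--     chain_terminators=None,
--     starting_monomers=None,
--     ending_monomers=None):
--     """
--     [This function takes a list of input monomers and outputs all possible
--     sequences or compositions that could arise within the constraints set,
--     which are described below]
--
--     Arguments:
--         monomers {list} -- [list of monomer one letter codes]
--         max_length {int} -- [maximum sequence length (in monomer units)]
--     Keyword Arguments:
--         min_length {int} -- [minimum sequence length (in monomer units)]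
--                             (default: {1})
--         sequencing {bool} -- [specifies whether all possible sequences are to
--                             be enumerated or just compositions. Set to False if
--                             you just need to screen for compositions]
--                             (default: {True})
--         chain_terminators {list} -- [list of monomers which prevent further
--                             elongation] (default: {None})
--         starting_monomers {list} -- [list of monomers. If this list is input,
--                             only sequences beginning with a monomer in this
--                             list will be returned] (default: {None})
--         ending_monomers {list} -- [list of monomers. If this is input,
--                             only sequences ending with a monomer in this list
--                             will be returned] (default: {None})
--     Returns:
--         sequences {list} -- [list of possible sequences that could arise from
--                             input monomers within the constraints set]
--     """
--     sequences = copy.deepcopy(monomers)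
--     for i in range(0,max_length-1):
--         for monomer in monomers:
--             sequences.extend(
--                 [seq+monomer for seq in sequences
--                 if len(seq) == i +1])
--     if not sequencing:
--         sequences = ["".join(sorted(seq)) for seq in sequences]
--     sequences = list(set(sequences))
--
--     if chain_terminators:
--         sequences = [
--             seq for seq in sequences
--             if (seq[0] in chain_terminators
--             or seq[-1] in chain_terminators)
--         ]
--     if starting_monomers:
--         sequences = [
--             seq for seq in sequences
--             if seq[0] in starting_monomers
--         ]
--     if ending_monomers:
--         sequences = [
--             seq for seq in sequences
--             if seq[-1] in ending_monomers
--         ]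
--
--     if not sequencing:
--         sequences = list(set(["".join(sorted(seq)) for seq in sequences]))
--
--     sequences = [seq for seq in sequences if len(seq) >= min_length]
--
--     return sequences
-- ===== SOURCE B (Python) =====
-- def generate_all_sequences(
--         monomers,
--         max_length,
--         min_length=1,
--         sequencing=True,
--         chain_terminators=None,
--         starting_monomers=None,
--         ending_monomers=None):
--     # Length-keyed buckets replace A's repeated full-list rescans: each step
--     # extends exactly the sequences of the current character length.
--     buckets = {}
--     for s in monomers:
--         buckets[len(s)] = buckets.get(len(s), []) + [s]
--     raw = list(monomers)
--     for i in range(max_length - 1):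
--         for m in monomers:
--             new = [s + m for s in buckets.get(i + 1, [])]
--             raw += new
--             key = i + 1 + len(m)
--             buckets[key] = buckets.get(key, []) + new
--     if not sequencing:
--         raw = ["".join(sorted(s)) for s in raw]
--     pool = list(set(raw))
--     if chain_terminators or starting_monomers or ending_monomers:
--         pool = [
--             s for s in pool
--             if (not chain_terminators
--                 or s[0] in chain_terminators
--                 or s[-1] in chain_terminators)
--             and (not starting_monomers or s[0] in starting_monomers)
--             and (not ending_monomers or s[-1] in ending_monomers)
--         ]
--     # composition strings are already sorted, so A's second dedup is a no-op
--     return [s for s in pool if len(s) >= min_length]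
-- ===== Notes on version B (the rewrite author's own statement) =====
-- stated objective: alternative
-- what changed: A re-extends by rescanning and length-filtering the whole growing sequence list for every (step, monomer) pair; B keeps a dict of per-character-length buckets so each step extends exactly the current bucket with no rescans, merges the three conditional filters into one pass, and drops A's redundant second composition dedup.
import Mathlib
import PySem

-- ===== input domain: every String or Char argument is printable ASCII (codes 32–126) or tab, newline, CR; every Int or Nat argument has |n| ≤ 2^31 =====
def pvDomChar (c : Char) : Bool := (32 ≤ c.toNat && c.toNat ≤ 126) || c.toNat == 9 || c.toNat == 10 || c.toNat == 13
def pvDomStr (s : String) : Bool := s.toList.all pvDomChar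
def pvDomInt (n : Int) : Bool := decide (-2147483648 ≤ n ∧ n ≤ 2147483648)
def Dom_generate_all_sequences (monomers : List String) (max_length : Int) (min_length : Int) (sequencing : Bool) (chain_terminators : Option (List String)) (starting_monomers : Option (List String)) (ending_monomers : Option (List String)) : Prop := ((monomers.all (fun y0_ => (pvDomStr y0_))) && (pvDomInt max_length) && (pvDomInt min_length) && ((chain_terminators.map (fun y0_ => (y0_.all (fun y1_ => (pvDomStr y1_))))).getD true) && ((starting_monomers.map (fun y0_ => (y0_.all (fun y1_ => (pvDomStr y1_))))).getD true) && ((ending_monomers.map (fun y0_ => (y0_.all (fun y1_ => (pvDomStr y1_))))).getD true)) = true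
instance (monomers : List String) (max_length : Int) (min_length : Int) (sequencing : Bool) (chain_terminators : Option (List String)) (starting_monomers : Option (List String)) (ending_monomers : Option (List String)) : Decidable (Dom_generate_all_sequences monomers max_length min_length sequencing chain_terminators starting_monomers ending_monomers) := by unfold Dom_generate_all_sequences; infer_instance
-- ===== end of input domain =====

-- ===== PORT A =====
-- B is an exact re-implementation of A: length-keyed buckets replace A's repeated
-- full-list rescans, the three monomer filters run in one pass, and A's redundant
-- second composition dedup is dropped (objective: alternative generation strategy).
-- NOTE: the returned list order after Python's list(set(...)) is hash-order; both
-- ports model it as first-occurrence dedup (PySem.Set.ofList); outputs are compared as sets.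

-- shared helpers: Python truthiness of an optional list, ''.join(sorted(s)), seq[0], seq[-1]
def pvTruthy (o : Option (List String)) : Bool := !(o.getD []).isEmpty
def pvJoinSorted (s : String) : String := String.ofList (PySem.List.sorted s.toList (fun c => c))
-- seq[0] / seq[-1]: total forms; Python raises IndexError on "" there, excluded by Pre_
def pvHead (s : String) : String := String.ofList [PySem.List.pyGetD s.toList 0 ' ']
def pvLast (s : String) : String := String.ofList [PySem.List.pyGetD s.toList (-1) ' ']

-- A, stage 1: the growth loop; each step i rescans the whole list for len(seq)==i+1
def pvGrowA (monomers : List String) (max_length : Int) : List String :=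
  (PySem.List.pyRange 0 (max_length - 1) 1).foldl
    (fun seqs i => monomers.foldl
      (fun seqs m => seqs ++ (seqs.filter (fun s => PySem.Str.len s == i + 1)).map (fun s => s ++ m))
      seqs)
    monomers

-- A, stages 3-5: the three conditional filters, one after the other
def pvFiltersA (chain_terminators starting_monomers ending_monomers : Option (List String))
    (l : List String) : List String :=
  let l := if pvTruthy chain_terminators then
      l.filter (fun s => decide (pvHead s ∈ chain_terminators.getD [])
                       || decide (pvLast s ∈ chain_terminators.getD [])) else l
  let l := if pvTruthy starting_monomers then
      l.filter (fun s => decide (pvHead s ∈ starting_monomers.getD [])) else l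
  let l := if pvTruthy ending_monomers then
      l.filter (fun s => decide (pvLast s ∈ ending_monomers.getD [])) else l
  l

def generate_all_sequences (monomers : List String) (max_length : Int) (min_length : Int) (sequencing : Bool) (chain_terminators : Option (List String)) (starting_monomers : Option (List String)) (ending_monomers : Option (List String)) : List String :=
  let sequences := pvGrowA monomers max_length
  let sequences := if sequencing then sequences else sequences.map pvJoinSorted
  let sequences := PySem.Set.ofList sequences
  let sequences := pvFiltersA chain_terminators starting_monomers ending_monomers sequences
  let sequences := if sequencing then sequences
    else PySem.Set.ofList (sequences.map pvJoinSorted)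
  sequences.filter (fun s => decide (min_length <= PySem.Str.len s))

-- ===== PORT B =====
-- B, stage 1: buckets[len] hold, in creation order, the sequences of each character length
def pvBucketsB (monomers : List String) : PySem.Dict Int (List String) :=
  monomers.foldl (fun d s => d.modify (PySem.Str.len s) [] (fun b => b ++ [s])) PySem.Dict.empty

def pvGrowB (monomers : List String) (max_length : Int) : List String :=
  ((PySem.List.pyRange 0 (max_length - 1) 1).foldl
    (fun (st : List String × PySem.Dict Int (List String)) i => monomers.foldl
      (fun st m =>
        let new := (st.2.getD (i + 1) []).map (fun s => s ++ m)
        (st.1 ++ new, st.2.modify (i + 1 + PySem.Str.len m) [] (fun b => b ++ new)))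
      st)
    (monomers, pvBucketsB monomers)).1

-- B, one merged filter pass
def pvFilterB (chain_terminators starting_monomers ending_monomers : Option (List String))
    (l : List String) : List String :=
  if pvTruthy chain_terminators || pvTruthy starting_monomers || pvTruthy ending_monomers then
    l.filter (fun s =>
      (!pvTruthy chain_terminators || decide (pvHead s ∈ chain_terminators.getD [])
                                   || decide (pvLast s ∈ chain_terminators.getD []))
      && (!pvTruthy starting_monomers || decide (pvHead s ∈ starting_monomers.getD []))
      && (!pvTruthy ending_monomers || decide (pvLast s ∈ ending_monomers.getD [])))
  else l

def generate_all_sequences_alt (monomers : List String) (max_length : Int) (min_length : Int) (sequencing : Bool) (chain_terminators : Option (List String)) (starting_monomers : Option (List String)) (ending_monomers : Option (List String)) : List String :=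
  let raw := pvGrowB monomers max_length
  let raw := if sequencing then raw else raw.map pvJoinSorted
  let pool := PySem.Set.ofList raw
  let pool := pvFilterB chain_terminators starting_monomers ending_monomers pool
  pool.filter (fun s => decide (min_length <= PySem.Str.len s))

-- ===== PRECONDITION & SPEC =====
-- Pre_ excludes exactly the inputs where the Python A raises IndexError: "" among the
-- monomers while some filter list is truthy ("" then reaches seq[0]/seq[-1]); B raises there too.
def Pre_generate_all_sequences (monomers : List String) (max_length : Int) (min_length : Int) (sequencing : Bool) (chain_terminators : Option (List String)) (starting_monomers : Option (List String)) (ending_monomers : Option (List String)) : Prop :=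
  (pvTruthy chain_terminators || pvTruthy starting_monomers || pvTruthy ending_monomers) = true
    → "" ∉ monomers
instance (monomers : List String) (max_length : Int) (min_length : Int) (sequencing : Bool) (chain_terminators : Option (List String)) (starting_monomers : Option (List String)) (ending_monomers : Option (List String)) : Decidable (Pre_generate_all_sequences monomers max_length min_length sequencing chain_terminators starting_monomers ending_monomers) := by unfold Pre_generate_all_sequences; infer_instance

def pvWitness_generate_all_sequences : List String × Int × Int × Bool × Option (List String) × Option (List String) × Option (List String) :=
  (["a", "b"], 3, 1, true, some ["a"], none, none)

def Spec_generate_all_sequences (monomers : List String) (max_length : Int) (min_length : Int) (sequencing : Bool) (chain_terminators : Option (List String)) (starting_monomers : Option (List String)) (ending_monomers : Option (List String)) (out : List String) : Prop := out = generate_all_sequences_alt monomers max_length min_length sequencing chain_terminators starting_monomers ending_monomers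
instance (monomers : List String) (max_length : Int) (min_length : Int) (sequencing : Bool) (chain_terminators : Option (List String)) (starting_monomers : Option (List String)) (ending_monomers : Option (List String)) (out : List String) : Decidable (Spec_generate_all_sequences monomers max_length min_length sequencing chain_terminators starting_monomers ending_monomers out) := by unfold Spec_generate_all_sequences; infer_instance

-- ===== CLAIM (what is proved, stated in full; the proofs are below) =====
def Claim_equal_generate_all_sequences : Prop := ∀ (monomers : List String) (max_length : Int) (min_length : Int) (sequencing : Bool) (chain_terminators : Option (List String)) (starting_monomers : Option (List String)) (ending_monomers : Option (List String)), Dom_generate_all_sequences monomers max_length min_length sequencing chain_terminators starting_monomers ending_monomers → Pre_generate_all_sequences monomers max_length min_length sequencing chain_terminators starting_monomers ending_monomers → Spec_generate_all_sequences monomers max_length min_length sequencing chain_terminators starting_monomers ending_monomers (generate_all_sequences monomers max_length min_length sequencing chain_terminators starting_monomers ending_monomers)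

-- ===== LEMMAS AND PROOFS =====

-- loop invariant: bucket k is exactly the subsequence of seqs of character length k
def pvInv (d : PySem.Dict Int (List String)) (seqs : List String) : Prop :=
  ∀ k : Int, d.getD k [] = seqs.filter (fun s => PySem.Str.len s == k)

theorem pvBuckets_getD (k : Int) : ∀ (ms : List String) (d : PySem.Dict Int (List String)),
    (ms.foldl (fun d s => d.modify (PySem.Str.len s) [] (fun b => b ++ [s])) d).getD k []
      = d.getD k [] ++ ms.filter (fun s => PySem.Str.len s == k) := by
  intro ms
  induction ms with
  | nil => intro d; simp
  | cons s ms ih =>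
      intro d
      rw [List.foldl_cons, ih, List.filter_cons, PySem.Dict.getD_modify]
      by_cases h : k = PySem.Str.len s
      · rw [if_pos h, if_pos (beq_iff_eq.mpr h.symm), h, List.append_assoc, List.singleton_append]
      · rw [if_neg h, if_neg (by simpa using fun hh => h (beq_iff_eq.mp hh).symm)]

theorem pvInv_init (monomers : List String) : pvInv (pvBucketsB monomers) monomers := by
  intro k
  simpa [pvBucketsB] using pvBuckets_getD k monomers PySem.Dict.empty

theorem pv_step_one (i : Int) (m : String) (seqs : List String)
    (d : PySem.Dict Int (List String)) (h : pvInv d seqs) :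
    (d.getD (i + 1) []).map (fun s => s ++ m)
        = (seqs.filter (fun s => PySem.Str.len s == i + 1)).map (fun s => s ++ m)
      ∧ pvInv (d.modify (i + 1 + PySem.Str.len m) []
                 (fun b => b ++ (d.getD (i + 1) []).map (fun s => s ++ m)))
          (seqs ++ (seqs.filter (fun s => PySem.Str.len s == i + 1)).map (fun s => s ++ m)) := by
  have hmap : (d.getD (i + 1) []).map (fun s => s ++ m)
      = (seqs.filter (fun s => PySem.Str.len s == i + 1)).map (fun s => s ++ m) := by rw [h]
  refine ⟨hmap, ?_⟩
  intro k
  rw [PySem.Dict.getD_modify, List.filter_append]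
  have hlen : ∀ x ∈ seqs.filter (fun s => PySem.Str.len s == i + 1),
      PySem.Str.len (x ++ m) = i + 1 + PySem.Str.len m := by
    intro x hx
    have hx1 : PySem.Str.len x = i + 1 := beq_iff_eq.mp (List.mem_filter.mp hx).2
    rw [PySem.Str.len_append, hx1]
  by_cases hk : k = i + 1 + PySem.Str.len m
  · have h2 : ((seqs.filter (fun s => PySem.Str.len s == i + 1)).map (fun s => s ++ m)).filter
        (fun s => PySem.Str.len s == k)
        = (seqs.filter (fun s => PySem.Str.len s == i + 1)).map (fun s => s ++ m) := by
      apply List.filter_eq_self.mpr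
      intro a ha
      obtain ⟨x, hx, rfl⟩ := List.mem_map.mp ha
      exact beq_iff_eq.mpr ((hlen x hx).trans hk.symm)
    rw [if_pos hk, h2, hmap, h, hk]
  · have h2 : ((seqs.filter (fun s => PySem.Str.len s == i + 1)).map (fun s => s ++ m)).filter
        (fun s => PySem.Str.len s == k) = [] := by
      apply List.filter_eq_nil_iff.mpr
      intro a ha
      obtain ⟨x, hx, rfl⟩ := List.mem_map.mp ha
      simpa using fun hh => hk ((beq_iff_eq.mp hh).symm.trans (hlen x hx))
    rw [if_neg hk, h2, h, List.append_nil]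

theorem pv_inner_fold (i : Int) : ∀ (ms : List String) (seqs : List String)
    (d : PySem.Dict Int (List String)), pvInv d seqs →
    (ms.foldl
        (fun st m =>
          let new := (st.2.getD (i + 1) []).map (fun s => s ++ m)
          (st.1 ++ new, st.2.modify (i + 1 + PySem.Str.len m) [] (fun b => b ++ new)))
        (seqs, d)).1
      = ms.foldl
          (fun seqs m =>
            seqs ++ (seqs.filter (fun s => PySem.Str.len s == i + 1)).map (fun s => s ++ m))
          seqs
    ∧ pvInv
        (ms.foldl
          (fun st m =>
            let new := (st.2.getD (i + 1) []).map (fun s => s ++ m)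
            (st.1 ++ new, st.2.modify (i + 1 + PySem.Str.len m) [] (fun b => b ++ new)))
          (seqs, d)).2
        (ms.foldl
          (fun seqs m =>
            seqs ++ (seqs.filter (fun s => PySem.Str.len s == i + 1)).map (fun s => s ++ m))
          seqs) := by
  intro ms
  induction ms with
  | nil => intro seqs d h; exact ⟨rfl, h⟩
  | cons m ms ih =>
      intro seqs d h
      obtain ⟨hmap, hinv⟩ := pv_step_one i m seqs d h
      simp only [List.foldl_cons]
      rw [show ((seqs, d).1 ++ ((seqs, d).2.getD (i + 1) []).map (fun s => s ++ m),
            (seqs, d).2.modify (i + 1 + PySem.Str.len m) []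
              (fun b => b ++ ((seqs, d).2.getD (i + 1) []).map (fun s => s ++ m)))
          = (seqs ++ (seqs.filter (fun s => PySem.Str.len s == i + 1)).map (fun s => s ++ m),
             d.modify (i + 1 + PySem.Str.len m) []
               (fun b => b ++ (d.getD (i + 1) []).map (fun s => s ++ m))) from by
        simp only []; rw [hmap]]
      exact ih _ _ hinv

theorem pv_outer_fold : ∀ (R : List Int) (monomers seqs : List String)
    (d : PySem.Dict Int (List String)), pvInv d seqs →
    (R.foldl
        (fun (st : List String × PySem.Dict Int (List String)) i => monomers.foldl
          (fun st m =>
            let new := (st.2.getD (i + 1) []).map (fun s => s ++ m)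
            (st.1 ++ new, st.2.modify (i + 1 + PySem.Str.len m) [] (fun b => b ++ new)))
          st)
        (seqs, d)).1
      = R.foldl
          (fun seqs i => monomers.foldl
            (fun seqs m =>
              seqs ++ (seqs.filter (fun s => PySem.Str.len s == i + 1)).map (fun s => s ++ m))
            seqs)
          seqs := by
  intro R
  induction R with
  | nil => intro monomers seqs d h; rfl
  | cons i R ih =>
      intro monomers seqs d h
      obtain ⟨h1, h2⟩ := pv_inner_fold i monomers seqs d h
      simp only [List.foldl_cons]
      have hp : (monomers.foldl
            (fun st m =>
              let new := (st.2.getD (i + 1) []).map (fun s => s ++ m)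
              (st.1 ++ new, st.2.modify (i + 1 + PySem.Str.len m) [] (fun b => b ++ new)))
            (seqs, d))
          = (monomers.foldl
              (fun seqs m =>
                seqs ++ (seqs.filter (fun s => PySem.Str.len s == i + 1)).map (fun s => s ++ m))
              seqs,
             (monomers.foldl
              (fun st m =>
                let new := (st.2.getD (i + 1) []).map (fun s => s ++ m)
                (st.1 ++ new, st.2.modify (i + 1 + PySem.Str.len m) [] (fun b => b ++ new)))
              (seqs, d)).2) := by
        exact Prod.ext h1 rfl
      rw [hp]
      exact ih monomers _ _ h2

theorem pvGrow_eq (monomers : List String) (max_length : Int) :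
    pvGrowB monomers max_length = pvGrowA monomers max_length := by
  unfold pvGrowB pvGrowA
  exact pv_outer_fold _ monomers monomers _ (pvInv_init monomers)

theorem pvFilters_eq (ct sm em : Option (List String)) (l : List String) :
    pvFiltersA ct sm em l = pvFilterB ct sm em l := by
  unfold pvFiltersA pvFilterB
  cases hct : pvTruthy ct <;> cases hsm : pvTruthy sm <;> cases hem : pvTruthy em <;>
    simp only [hct, hsm, hem, Bool.false_or, Bool.true_or, Bool.or_true, Bool.or_false,
      Bool.not_true, Bool.not_false, Bool.true_and, Bool.and_true, Bool.false_eq_true,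
      if_true, if_false, List.filter_filter] <;>
    first
    | rfl
    | · refine List.filter_congr fun x _ => ?_
        by_cases h1 : pvHead x ∈ ct.getD [] <;> by_cases h2 : pvLast x ∈ ct.getD [] <;>
          by_cases h3 : pvHead x ∈ sm.getD [] <;> by_cases h4 : pvLast x ∈ em.getD [] <;>
          simp [h1, h2, h3, h4]

theorem pvJoinSorted_idem (s : String) : pvJoinSorted (pvJoinSorted s) = pvJoinSorted s := by
  simp [pvJoinSorted, String.toList_ofList, PySem.List.sorted_sorted]

theorem pv_second_pass (l : List String) (hl : l.Nodup)
    (hs : ∀ x ∈ l, pvJoinSorted x = x) :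
    PySem.Set.ofList (l.map pvJoinSorted) = l := by
  rw [List.map_congr_left hs, List.map_id']
  exact PySem.Set.ofList_eq_self_of_nodup l hl

-- elements surviving A's filters came from the deduped pool
theorem pvFiltersA_subset (ct sm em : Option (List String)) (l : List String) :
    ∀ x ∈ pvFiltersA ct sm em l, x ∈ l := by
  unfold pvFiltersA
  intro x hx
  split_ifs at hx <;>
    repeat' first
      | exact hx
      | replace hx := List.mem_of_mem_filter hx

theorem pvFiltersA_nodup (ct sm em : Option (List String)) (l : List String) (hl : l.Nodup) :
    (pvFiltersA ct sm em l).Nodup := by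
  unfold pvFiltersA
  split_ifs <;> first
    | exact hl
    | exact hl.filter _
    | exact (hl.filter _).filter _
    | exact ((hl.filter _).filter _).filter _

-- ===== VERDICT =====
theorem generate_all_sequences_spec : Claim_equal_generate_all_sequences := by
  intro monomers max_length min_length sequencing ct sm em _ _
  unfold Spec_generate_all_sequences generate_all_sequences generate_all_sequences_alt
  simp only [pvGrow_eq, pvFilters_eq]
  cases sequencing with
  | true => simp
  | false =>
      simp only [if_false, Bool.false_eq_true]
      rw [← pvFilters_eq]
      congr 1
      set pool := PySem.Set.ofList ((pvGrowA monomers max_length).map pvJoinSorted) with hpool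
      apply pv_second_pass
      · exact pvFiltersA_nodup ct sm em pool (PySem.Set.nodup_ofList _)
      · intro x hx
        have hx' : x ∈ pool := pvFiltersA_subset ct sm em pool x hx
        have : x ∈ (pvGrowA monomers max_length).map pvJoinSorted :=
          (PySem.Set.mem_ofList _ _).mp hx'
        obtain ⟨y, _, rfl⟩ := List.mem_map.mp this
        exact pvJoinSorted_idem y
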